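-- pv_equiv track=rewrite | github.com/RevansChen/online-judge | Codefights/arcade/code-arcade/level-4/28.Lineup/Python/solution1.py | lineUp
-- ===== SOURCE A (Python) =====
-- def lineUp(commands):
--     count = 0
--     table = { 'L': -1, 'R': 1, 'A': 2 }
--     dir1, dir2 = 0, 0
--     for cmd1, cmd2 in zip(commands, commands.translate({82: 76, 76: 82})):
--         dir1 = (dir1 + table[cmd1]) % 4
--         dir2 = (dir2 + table[cmd2]) % 4
--         if dir1 == dir2:
--             count += 1
--     return count
-- ===== SOURCE B (Python) =====
-- def lineUp(commands):
--     count = 0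
--     table = { 'L': -1, 'R': 1, 'A': 2 }
--     parity = 0
--     for cmd in commands:
--         parity = (parity + table[cmd]) % 2
--         if parity == 0:
--             count += 1
--     return count
-- ===== Notes on version B (the rewrite author's own statement) =====
-- stated objective: simpler
-- what changed: B drops the mirrored-string translate/zip and the two mod-4 direction accumulators, keeping a single mod-2 turn-parity counter: the soldiers face the same way iff the number of turning commands so far is even.
import Mathlib
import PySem

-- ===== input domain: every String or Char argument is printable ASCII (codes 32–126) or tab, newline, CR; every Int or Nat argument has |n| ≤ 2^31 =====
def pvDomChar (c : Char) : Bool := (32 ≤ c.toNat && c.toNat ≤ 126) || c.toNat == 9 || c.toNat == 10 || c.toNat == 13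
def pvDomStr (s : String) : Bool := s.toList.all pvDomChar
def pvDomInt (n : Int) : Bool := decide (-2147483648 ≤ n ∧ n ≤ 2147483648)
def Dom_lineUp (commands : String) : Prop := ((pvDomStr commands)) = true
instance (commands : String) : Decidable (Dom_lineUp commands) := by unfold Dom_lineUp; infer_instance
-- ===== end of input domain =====

-- B replaces A's mirrored-string translate/zip and two mod-4 direction accumulators by a single
-- mod-2 turn-parity counter (same direction iff the number of L/R turns so far is even): simpler.

-- ===== PORT A =====
-- table = {'L': -1, 'R': 1, 'A': 2} (shared by both Pythons)
def pvTable : PySem.Dict Char Int := PySem.Dict.ofList [('L', -1), ('R', 1), ('A', 2)]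

-- commands.translate({82: 76, 76: 82}) maps each char: 'R'→'L', 'L'→'R', others unchanged
def pvMir (c : Char) : Char := if c = 'R' then 'L' else if c = 'L' then 'R' else c

-- one iteration of A's loop body over state (count, dir1, dir2); table.getD _ 0 is exact on
-- Pre_lineUp inputs (outside Pre_ the Python raises KeyError)
def pvStepA (st : Int × Int × Int) (pr : Char × Char) : Int × Int × Int :=
  let d1 := PySem.Int.mod (st.2.1 + pvTable.getD pr.1 0) 4
  let d2 := PySem.Int.mod (st.2.2 + pvTable.getD pr.2 0) 4
  (if d1 = d2 then st.1 + 1 else st.1, d1, d2)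

def lineUp (commands : String) : Int :=
  ((commands.toList.zip (commands.toList.map pvMir)).foldl pvStepA (0, 0, 0)).1

-- ===== PORT B =====
-- one iteration of B's loop body over state (count, parity)
def pvStepB (st : Int × Int) (c : Char) : Int × Int :=
  let p := PySem.Int.mod (st.2 + pvTable.getD c 0) 2
  (if p = 0 then st.1 + 1 else st.1, p)

def lineUp_alt (commands : String) : Int :=
  (commands.toList.foldl pvStepB (0, 0)).1

-- ===== PRECONDITION & SPEC =====
-- Pre_ excludes exactly the inputs on which the Python A (and B alike) raises KeyError:
-- any character other than 'L', 'R', 'A'.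
def Pre_lineUp (commands : String) : Prop :=
  (commands.toList.all fun c => c == 'L' || c == 'R' || c == 'A') = true
instance (commands : String) : Decidable (Pre_lineUp commands) := by unfold Pre_lineUp; infer_instance
def pvWitness_lineUp : String := ("LLARL")

def Spec_lineUp (commands : String) (out : Int) : Prop := out = lineUp_alt commands
instance (commands : String) (out : Int) : Decidable (Spec_lineUp commands out) := by unfold Spec_lineUp; infer_instance

-- ===== CLAIM (what is proved, stated in full; the proofs are below) =====
def Claim_equal_lineUp : Prop := ∀ (commands : String), Dom_lineUp commands → Pre_lineUp commands → Spec_lineUp commands (lineUp commands)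

-- ===== LEMMAS AND PROOFS =====
lemma pv_mod4 (a : Int) : PySem.Int.mod a 4 = a % 4 := PySem.Int.mod_eq_emod_of_pos (by norm_num)
lemma pv_mod2 (a : Int) : PySem.Int.mod a 2 = a % 2 := PySem.Int.mod_eq_emod_of_pos (by norm_num)

lemma pv_mirL : pvMir 'L' = 'R' := rfl
lemma pv_mirR : pvMir 'R' = 'L' := rfl
lemma pv_mirA : pvMir 'A' = 'A' := rfl

lemma pv_tL : pvTable.getD 'L' 0 = -1 := by decide
lemma pv_tR : pvTable.getD 'R' 0 = 1 := by decide
lemma pv_tA : pvTable.getD 'A' 0 = 2 := by decide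

lemma pv_loop (l : List Char) : ∀ (count d1 d2 p : Int),
    (∀ c ∈ l, c = 'L' ∨ c = 'R' ∨ c = 'A') →
    0 ≤ d1 → d1 < 4 → 0 ≤ d2 → d2 < 4 → 0 ≤ p → p < 2 →
    (d1 - d2) % 4 = 2 * p →
    ((l.map (fun c => (c, pvMir c))).foldl pvStepA (count, d1, d2)).1
      = (l.foldl pvStepB (count, p)).1 := by
  induction l with
  | nil => intros; rfl
  | cons c rest ih =>
    intro count d1 d2 p hmem h1 h2 h3 h4 h5 h6 hinv
    obtain hc | hc | hc := hmem c (by simp) <;> subst hc <;>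
      simp only [List.map_cons, List.foldl_cons, pvStepA, pvStepB, pv_mirL, pv_mirR, pv_mirA,
        pv_tL, pv_tR, pv_tA, pv_mod4, pv_mod2]
    · rw [if_congr (show (d1 + -1) % 4 = (d2 + 1) % 4 ↔ (p + -1) % 2 = 0 by omega) rfl rfl]
      exact ih _ _ _ _ (fun x hx => hmem x (by simp [hx]))
        (by omega) (by omega) (by omega) (by omega) (by omega) (by omega) (by omega)
    · rw [if_congr (show (d1 + 1) % 4 = (d2 + -1) % 4 ↔ (p + 1) % 2 = 0 by omega) rfl rfl]
      exact ih _ _ _ _ (fun x hx => hmem x (by simp [hx]))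
        (by omega) (by omega) (by omega) (by omega) (by omega) (by omega) (by omega)
    · rw [if_congr (show (d1 + 2) % 4 = (d2 + 2) % 4 ↔ (p + 2) % 2 = 0 by omega) rfl rfl]
      exact ih _ _ _ _ (fun x hx => hmem x (by simp [hx]))
        (by omega) (by omega) (by omega) (by omega) (by omega) (by omega) (by omega)

-- ===== VERDICT (by name: the statement is the Claim_ definition above) =====
theorem lineUp_spec : Claim_equal_lineUp := by
  intro commands _ hpre
  have hpre' : ∀ c ∈ commands.toList, c = 'L' ∨ c = 'R' ∨ c = 'A' := by
    simpa only [Pre_lineUp, List.all_eq_true, Bool.or_eq_true, beq_iff_eq, or_assoc] using hpre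
  unfold Spec_lineUp lineUp lineUp_alt
  have hz : commands.toList.zip (commands.toList.map pvMir)
      = commands.toList.map (fun c => (c, pvMir c)) := by
    simpa using (List.zip_map' : (commands.toList.map id).zip (commands.toList.map pvMir) = _)
  rw [hz]
  exact pv_loop commands.toList 0 0 0 0 hpre' (by norm_num) (by norm_num) (by norm_num)
    (by norm_num) (by norm_num) (by norm_num) (by norm_num)
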